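-- pv_equiv track=rewrite | github.com/gautamadhikari-078/Assignment-2-Task-Celebal-Python- | Task 6 Collection counter.py | calculate_earnings
-- ===== SOURCE A (Python) =====
-- from collections import Counter
--
-- def calculate_earnings(num_shoes, shoe_sizes, num_customers, customers):
--     # Count the occurrences of each shoe size
--     shoe_count = Counter(shoe_sizes)
--
--     total_earnings = 0
--
--     # Process each customer
--     for size, price in customers:
--         if shoe_count[size] > 0:
--             total_earnings += price
--             shoe_count[size] -= 1
--
--     return total_earnings
-- ===== SOURCE B (Python) =====
-- from collections import Counter
--
-- def calculate_earnings(num_shoes, shoe_sizes, num_customers, customers):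
--     # Two-phase: group customer prices by requested size, then take each
--     # size's supply-length prefix and sum it.
--     supply = Counter(shoe_sizes)
--     groups = {}
--     for size, price in customers:
--         groups[size] = groups.get(size, []) + [price]
--     total_earnings = 0
--     for size, prices in groups.items():
--         total_earnings += sum(prices[:supply[size]])
--     return total_earnings
-- ===== Notes on version B (the rewrite author's own statement) =====
-- stated objective: alternative
-- what changed: Replaces A's single scan that live-decrements a supply counter per customer with a two-phase pass: first group customer prices by size into an insertion-ordered dict, then sum, for each size, the prefix of its price list of length equal to that size's supply.
import Mathlib
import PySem

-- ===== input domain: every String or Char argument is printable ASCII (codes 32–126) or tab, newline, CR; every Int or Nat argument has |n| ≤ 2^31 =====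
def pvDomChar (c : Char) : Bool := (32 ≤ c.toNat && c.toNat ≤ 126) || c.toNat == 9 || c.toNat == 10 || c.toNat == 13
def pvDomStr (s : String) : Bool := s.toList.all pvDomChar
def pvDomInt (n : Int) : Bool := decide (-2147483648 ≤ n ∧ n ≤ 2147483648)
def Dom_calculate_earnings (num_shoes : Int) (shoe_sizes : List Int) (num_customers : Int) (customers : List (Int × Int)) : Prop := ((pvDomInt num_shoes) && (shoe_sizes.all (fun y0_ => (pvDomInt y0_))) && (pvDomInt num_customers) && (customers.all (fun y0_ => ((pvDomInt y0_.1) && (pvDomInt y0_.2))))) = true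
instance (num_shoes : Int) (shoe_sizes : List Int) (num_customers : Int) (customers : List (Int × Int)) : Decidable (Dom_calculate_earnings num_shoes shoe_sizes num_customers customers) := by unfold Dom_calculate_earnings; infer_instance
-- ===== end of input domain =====

-- B replaces A's live-decrement scan with a group-by-size-then-prefix-sum pass (alternative decomposition, same result).

-- ===== PORT A =====
def calculate_earnings (num_shoes : Int) (shoe_sizes : List Int) (num_customers : Int) (customers : List (Int × Int)) : Int :=
  let shoe_count := PySem.Dict.counter shoe_sizes
  (customers.foldl
    (fun st sp =>
      if st.1.getD sp.1 0 > 0 then (st.1.insert sp.1 (st.1.getD sp.1 0 - 1), st.2 + sp.2)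
      else st)
    (shoe_count, (0 : Int))).2

-- ===== PORT B =====
def calculate_earnings_alt (num_shoes : Int) (shoe_sizes : List Int) (num_customers : Int) (customers : List (Int × Int)) : Int :=
  let supply := PySem.Dict.counter shoe_sizes
  let groups := customers.foldl (fun d p => d.modify p.1 [] (· ++ [p.2])) PySem.Dict.empty
  groups.items.foldl (fun t sp => t + (PySem.List.slice sp.2 none (some (supply.getD sp.1 0))).sum) 0

-- ===== PRECONDITION & SPEC =====
def Spec_calculate_earnings (num_shoes : Int) (shoe_sizes : List Int) (num_customers : Int) (customers : List (Int × Int)) (out : Int) : Prop := out = calculate_earnings_alt num_shoes shoe_sizes num_customers customers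
instance (num_shoes : Int) (shoe_sizes : List Int) (num_customers : Int) (customers : List (Int × Int)) (out : Int) : Decidable (Spec_calculate_earnings num_shoes shoe_sizes num_customers customers out) := by unfold Spec_calculate_earnings; infer_instance

-- ===== CLAIM (what is proved, stated in full; the proofs are below) =====
def Claim_equal_calculate_earnings : Prop := ∀ (num_shoes : Int) (shoe_sizes : List Int) (num_customers : Int) (customers : List (Int × Int)), Dom_calculate_earnings num_shoes shoe_sizes num_customers customers → Spec_calculate_earnings num_shoes shoe_sizes num_customers customers (calculate_earnings num_shoes shoe_sizes num_customers customers)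

-- ===== LEMMAS AND PROOFS =====

-- reference recursion: A's loop with the counter abstracted to a function
def specF : List (Int × Int) → (Int → Int) → Int
  | [], _ => 0
  | (s, p) :: cs, f =>
      if f s > 0 then p + specF cs (fun x => if x = s then f s - 1 else f x)
      else specF cs f

def pricesOf (s : Int) (cs : List (Int × Int)) : List Int :=
  (cs.filter (fun p => p.1 == s)).map (·.2)

lemma foldA_eq (cs : List (Int × Int)) :
    ∀ (d : PySem.Dict Int Int) (t : Int),
    (cs.foldl
      (fun st sp =>
        if st.1.getD sp.1 0 > 0 then (st.1.insert sp.1 (st.1.getD sp.1 0 - 1), st.2 + sp.2)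
        else st)
      (d, t)).2 = t + specF cs (fun s => d.getD s 0) := by
  induction cs with
  | nil => intro d t; simp [specF]
  | cons hd tl ih =>
      intro d t
      obtain ⟨s, p⟩ := hd
      by_cases h : d.getD s 0 > 0
      · simp only [List.foldl_cons, specF, if_pos h]
        rw [ih]
        have hf : (fun x => (d.insert s (d.getD s 0 - 1)).getD x 0)
            = fun x => if x = s then d.getD s 0 - 1 else d.getD x 0 := by
          funext x
          simp [PySem.Dict.getD_insert]
        simp [hf]
        ring
      · simp only [List.foldl_cons, specF, if_neg h]
        rw [ih]

lemma sum_map_update {L : List Int} (hnd : L.Nodup) (s : Int) (hs : s ∈ L)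
    (g h : Int → Int) (hne : ∀ x, x ≠ s → g x = h x) :
    (L.map g).sum = (g s - h s) + (L.map h).sum := by
  induction L with
  | nil => cases hs
  | cons a l ih =>
      rcases List.mem_cons.mp hs with rfl | hmem
      · have : ∀ x ∈ l, g x = h x := by
          intro x hx
          exact hne x (fun hxa => (List.nodup_cons.mp hnd).1 (hxa ▸ hx))
        simp [List.map_congr_left this]
        ring
      · have ha : g a = h a := hne a (fun haa => (List.nodup_cons.mp hnd).1 (haa ▸ hmem))
        simp only [List.map_cons, List.sum_cons, ih (List.nodup_cons.mp hnd).2 hmem, ha]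
        ring

lemma pricesOf_cons_self (s p : Int) (cs : List (Int × Int)) :
    pricesOf s ((s, p) :: cs) = p :: pricesOf s cs := by
  simp [pricesOf]

lemma pricesOf_cons_ne (x s p : Int) (hx : x ≠ s) (cs : List (Int × Int)) :
    pricesOf x ((s, p) :: cs) = pricesOf x cs := by
  simp [pricesOf, Ne.symm hx]

lemma specF_eq (cs : List (Int × Int)) :
    ∀ (f : Int → Int) (L : List Int), L.Nodup → (∀ s, 0 ≤ f s) →
    (∀ q ∈ cs, q.1 ∈ L) →
    specF cs f
      = (L.map (fun s => (PySem.List.slice (pricesOf s cs) none (some (f s))).sum)).sum := by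
  induction cs with
  | nil =>
      intro f L hnd hpos hmem
      simp [specF, pricesOf, PySem.List.slice]
  | cons hd tl ih =>
      intro f L hnd hpos hmem
      obtain ⟨s, p⟩ := hd
      have hsL : s ∈ L := hmem (s, p) List.mem_cons_self
      have hmem' : ∀ q ∈ tl, q.1 ∈ L := fun q hq => hmem q (List.mem_cons_of_mem _ hq)
      by_cases h : f s > 0
      · have hpos' : ∀ x, 0 ≤ (fun x => if x = s then f s - 1 else f x) x := by
          intro x
          dsimp only
          split_ifs with hx
          · omega
          · exact hpos x
        simp only [specF, if_pos h]
        rw [ih (fun x => if x = s then f s - 1 else f x) L hnd hpos' hmem']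
        rw [sum_map_update hnd s hsL
          (fun x => (PySem.List.slice (pricesOf x ((s, p) :: tl)) none (some (f x))).sum)
          (fun x => (PySem.List.slice (pricesOf x tl) none (some (if x = s then f s - 1 else f x))).sum)
          (by
            intro x hx
            simp only [pricesOf_cons_ne x s p hx tl, if_neg hx])]
        have hfs : 0 ≤ f s := hpos s
        have hstep : (PySem.List.slice (pricesOf s ((s, p) :: tl)) none (some (f s))).sum
            = p + (PySem.List.slice (pricesOf s tl) none (some (f s - 1))).sum := by
          rw [pricesOf_cons_self, PySem.List.slice_to _ hfs,
            PySem.List.slice_to _ (by omega : (0:Int) ≤ f s - 1)]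
          have hh : (f s).toNat = (f s - 1).toNat + 1 := by omega
          rw [hh, List.take_succ_cons]
          simp
        rw [hstep]
        simp
      · have hz : f s = 0 := le_antisymm (by omega) (hpos s)
        simp only [specF, if_neg h]
        rw [ih f L hnd hpos hmem']
        apply congrArg
        apply List.map_congr_left
        intro x hx
        by_cases hxs : x = s
        · subst hxs
          rw [pricesOf_cons_self]
          simp [hz, PySem.List.slice_to]
        · rw [pricesOf_cons_ne x s p hxs tl]

lemma foldl_add_sum (l : List (Int × List Int)) (g : Int × List Int → Int) :
    ∀ a : Int, l.foldl (fun t sp => t + g sp) a = a + (l.map g).sum := by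
  induction l with
  | nil => intro a; simp
  | cons hd tl ih => intro a; simp [ih]; ring

-- ===== VERDICT (by name: the statement is the Claim_ definition above) =====
theorem calculate_earnings_spec : Claim_equal_calculate_earnings := by
  intro ns ss nc cs _
  unfold Spec_calculate_earnings calculate_earnings calculate_earnings_alt
  simp only []
  rw [foldA_eq]
  have hnd : (cs.foldl (fun d p => d.modify p.1 [] (· ++ [p.2])) PySem.Dict.empty).keys.Nodup := by
    apply PySem.Dict.nodup_keys_foldl_modify_key
    simp [PySem.Dict.keys_empty]
  rw [foldl_add_sum,
      PySem.Dict.items_eq_map_keys _ hnd ([] : List Int)]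
  rw [PySem.Dict.keys_foldl_modify_key]
  simp only [PySem.Dict.keys_empty, PySem.Set.update_nil_left, List.map_map]
  have hget : ∀ k : Int,
      (cs.foldl (fun d p => d.modify p.1 [] (· ++ [p.2])) PySem.Dict.empty).getD k [] = pricesOf k cs := by
    intro k
    rw [PySem.Dict.getD_foldl_modify_append]
    simp [pricesOf, PySem.Dict.getD_empty]
  rw [specF_eq cs (fun s => (PySem.Dict.counter ss).getD s 0)
      (PySem.Set.ofList (cs.map (·.1)))
      (PySem.Set.nodup_ofList _)
      (by intro s; show (0:Int) ≤ (PySem.Dict.counter ss).getD s 0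
          rw [PySem.Dict.getD_counter]; exact Int.natCast_nonneg _)
      (by
        intro q hq
        rw [PySem.Set.mem_ofList]
        exact List.mem_map.mpr ⟨q, hq, rfl⟩)]
  simp only [Function.comp_def, hget]
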